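-- pv_equiv track=rewrite | github.com/sthamann/TFPTcomputing | constants/scripts/update_status_categorization.py | categorize_constant
-- ===== SOURCE A (Python) =====
-- def categorize_constant(constant_data):
--     """Assign proper category based on physics domain."""
--     const_id = constant_data['id']
--
--     # Category mapping
--     categories = {
--         'fundamental_topology': ['c_3', 'phi_0', 'alpha'],
--         'gauge': ['alpha_s', 'sin2_theta_w', 'g_1', 'g_2', 'theta_qcd', 'beta_x'],
--         'flavour': ['m_e', 'm_mu', 'm_tau', 'm_u', 'm_d', 'm_s', 'm_c', 'm_b', 'm_t',
--                    'v_us_v_ud', 'v_cb', 'v_td_v_ts', 'theta_c', 'y_e', 'y_t'],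
--         'electroweak': ['v_h', 'v_H', 'm_w', 'm_z', 'rho_parameter', 'g_f'],
--         'scale_hierarchy': ['lambda_qcd', 'lambda_qg', 'e_knee', 'm_planck', 'lambda_star'],
--         'cosmology': ['rho_lambda', 'w_de', 'omega_b', 'n_s', 'r_tensor', 'tau_reio',
--                      'alpha_d', 'f_b', 'eta_b', 't_gamma_0', 't_nu'],
--         'anomalies': ['delta_a_mu', 'a_p', 'delta_gamma', 'delta_nu_t'],
--         'lifetimes': ['tau_mu', 'tau_tau', 'tau_star'],
--         'derived': ['epsilon_k', 'c_4', 'z_0', 'gamma_function', 'm_nu', 'sigma_m_nu',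
--                    'm_s_m_d_ratio', 'mu_p', 'mu_p_mu_n', 'delta_m_n_p', 'm_p',
--                    'f_pi_lambda_qcd']
--     }
--
--     # Find category for constant
--     for category, constants in categories.items():
--         if const_id in constants:
--             return category
--
--     # Default category
--     return constant_data.get('category', 'derived')
-- ===== SOURCE B (Python) =====
-- # B inverts the category table into one flat id->category dict written out directly
-- # (each id appears in exactly one category, so the inversion is exact); the function
-- # body is a single dict lookup instead of A's scan over per-category lists.
--
-- _CATEGORY_OF = {
--     'c_3': 'fundamental_topology',
--     'phi_0': 'fundamental_topology',
--     'alpha': 'fundamental_topology',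
--     'alpha_s': 'gauge',
--     'sin2_theta_w': 'gauge',
--     'g_1': 'gauge',
--     'g_2': 'gauge',
--     'theta_qcd': 'gauge',
--     'beta_x': 'gauge',
--     'm_e': 'flavour',
--     'm_mu': 'flavour',
--     'm_tau': 'flavour',
--     'm_u': 'flavour',
--     'm_d': 'flavour',
--     'm_s': 'flavour',
--     'm_c': 'flavour',
--     'm_b': 'flavour',
--     'm_t': 'flavour',
--     'v_us_v_ud': 'flavour',
--     'v_cb': 'flavour',
--     'v_td_v_ts': 'flavour',
--     'theta_c': 'flavour',
--     'y_e': 'flavour',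
--     'y_t': 'flavour',
--     'v_h': 'electroweak',
--     'v_H': 'electroweak',
--     'm_w': 'electroweak',
--     'm_z': 'electroweak',
--     'rho_parameter': 'electroweak',
--     'g_f': 'electroweak',
--     'lambda_qcd': 'scale_hierarchy',
--     'lambda_qg': 'scale_hierarchy',
--     'e_knee': 'scale_hierarchy',
--     'm_planck': 'scale_hierarchy',
--     'lambda_star': 'scale_hierarchy',
--     'rho_lambda': 'cosmology',
--     'w_de': 'cosmology',
--     'omega_b': 'cosmology',
--     'n_s': 'cosmology',
--     'r_tensor': 'cosmology',
--     'tau_reio': 'cosmology',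
--     'alpha_d': 'cosmology',
--     'f_b': 'cosmology',
--     'eta_b': 'cosmology',
--     't_gamma_0': 'cosmology',
--     't_nu': 'cosmology',
--     'delta_a_mu': 'anomalies',
--     'a_p': 'anomalies',
--     'delta_gamma': 'anomalies',
--     'delta_nu_t': 'anomalies',
--     'tau_mu': 'lifetimes',
--     'tau_tau': 'lifetimes',
--     'tau_star': 'lifetimes',
--     'epsilon_k': 'derived',
--     'c_4': 'derived',
--     'z_0': 'derived',
--     'gamma_function': 'derived',
--     'm_nu': 'derived',
--     'sigma_m_nu': 'derived',
--     'm_s_m_d_ratio': 'derived',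
--     'mu_p': 'derived',
--     'mu_p_mu_n': 'derived',
--     'delta_m_n_p': 'derived',
--     'm_p': 'derived',
--     'f_pi_lambda_qcd': 'derived',
-- }
--
--
-- def categorize_constant(constant_data):
--     """Assign proper category based on physics domain."""
--     cat = _CATEGORY_OF.get(constant_data['id'])
--     if cat is not None:
--         return cat
--     return constant_data.get('category', 'derived')
-- ===== Notes on version B (the rewrite author's own statement) =====
-- stated objective: idiomatic
-- what changed: Replaces A's per-call scan over a category->ids table (membership test in each category's list) with a single flat id->category dictionary written out directly (exact since each id occurs in exactly one category), so the body is one lookup.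
import Mathlib
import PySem

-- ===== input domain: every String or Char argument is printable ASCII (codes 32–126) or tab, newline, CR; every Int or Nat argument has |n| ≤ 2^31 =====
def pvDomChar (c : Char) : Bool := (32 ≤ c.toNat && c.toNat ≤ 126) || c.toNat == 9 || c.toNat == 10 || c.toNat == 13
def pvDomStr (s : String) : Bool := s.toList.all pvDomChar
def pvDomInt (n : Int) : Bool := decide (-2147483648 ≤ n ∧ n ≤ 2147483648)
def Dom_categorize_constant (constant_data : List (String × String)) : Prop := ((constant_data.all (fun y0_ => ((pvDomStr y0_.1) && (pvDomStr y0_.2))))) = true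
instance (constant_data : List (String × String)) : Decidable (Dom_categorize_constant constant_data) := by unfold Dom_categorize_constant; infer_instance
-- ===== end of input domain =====

-- B replaces A's per-call scan over the category table with one flat id→category association
-- list written out directly (exact: each id occurs in exactly one category); objective: idiomatic.


-- ===== PORT A =====
-- A's nested category → ids table, as written in A
def catTable : List (String × List String) :=
  [("fundamental_topology", ["c_3", "phi_0", "alpha"]),
   ("gauge", ["alpha_s", "sin2_theta_w", "g_1", "g_2", "theta_qcd", "beta_x"]),
   ("flavour", ["m_e", "m_mu", "m_tau", "m_u", "m_d", "m_s", "m_c", "m_b", "m_t",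
                "v_us_v_ud", "v_cb", "v_td_v_ts", "theta_c", "y_e", "y_t"]),
   ("electroweak", ["v_h", "v_H", "m_w", "m_z", "rho_parameter", "g_f"]),
   ("scale_hierarchy", ["lambda_qcd", "lambda_qg", "e_knee", "m_planck", "lambda_star"]),
   ("cosmology", ["rho_lambda", "w_de", "omega_b", "n_s", "r_tensor", "tau_reio",
                  "alpha_d", "f_b", "eta_b", "t_gamma_0", "t_nu"]),
   ("anomalies", ["delta_a_mu", "a_p", "delta_gamma", "delta_nu_t"]),
   ("lifetimes", ["tau_mu", "tau_tau", "tau_star"]),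
   ("derived", ["epsilon_k", "c_4", "z_0", "gamma_function", "m_nu", "sigma_m_nu",
                "m_s_m_d_ratio", "mu_p", "mu_p_mu_n", "delta_m_n_p", "m_p",
                "f_pi_lambda_qcd"])]

-- A's loop: first category whose id list contains const_id
def findCategory : String → List (String × List String) → Option String
  | _, [] => none
  | cid, (c, ids) :: rest => if ids.contains cid then some c else findCategory cid rest

def categorize_constant (constant_data : List (String × String)) : String :=
  match constant_data.lookup "id" with
  | none => ""   -- Python raises KeyError here; excluded by Pre_
  | some cid =>
    match findCategory cid catTable with
    | some c => c
    | none => (constant_data.lookup "category").getD "derived"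

-- ===== PORT B =====
-- Source B's flat literal dict; its keys are pairwise distinct, so the Python dict literal is
-- exactly this association list with first-match lookup.
def idCategoryPairs : List (String × String) :=
  [("c_3", "fundamental_topology"),
   ("phi_0", "fundamental_topology"),
   ("alpha", "fundamental_topology"),
   ("alpha_s", "gauge"),
   ("sin2_theta_w", "gauge"),
   ("g_1", "gauge"),
   ("g_2", "gauge"),
   ("theta_qcd", "gauge"),
   ("beta_x", "gauge"),
   ("m_e", "flavour"),
   ("m_mu", "flavour"),
   ("m_tau", "flavour"),
   ("m_u", "flavour"),
   ("m_d", "flavour"),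
   ("m_s", "flavour"),
   ("m_c", "flavour"),
   ("m_b", "flavour"),
   ("m_t", "flavour"),
   ("v_us_v_ud", "flavour"),
   ("v_cb", "flavour"),
   ("v_td_v_ts", "flavour"),
   ("theta_c", "flavour"),
   ("y_e", "flavour"),
   ("y_t", "flavour"),
   ("v_h", "electroweak"),
   ("v_H", "electroweak"),
   ("m_w", "electroweak"),
   ("m_z", "electroweak"),
   ("rho_parameter", "electroweak"),
   ("g_f", "electroweak"),
   ("lambda_qcd", "scale_hierarchy"),
   ("lambda_qg", "scale_hierarchy"),
   ("e_knee", "scale_hierarchy"),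
   ("m_planck", "scale_hierarchy"),
   ("lambda_star", "scale_hierarchy"),
   ("rho_lambda", "cosmology"),
   ("w_de", "cosmology"),
   ("omega_b", "cosmology"),
   ("n_s", "cosmology"),
   ("r_tensor", "cosmology"),
   ("tau_reio", "cosmology"),
   ("alpha_d", "cosmology"),
   ("f_b", "cosmology"),
   ("eta_b", "cosmology"),
   ("t_gamma_0", "cosmology"),
   ("t_nu", "cosmology"),
   ("delta_a_mu", "anomalies"),
   ("a_p", "anomalies"),
   ("delta_gamma", "anomalies"),
   ("delta_nu_t", "anomalies"),
   ("tau_mu", "lifetimes"),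
   ("tau_tau", "lifetimes"),
   ("tau_star", "lifetimes"),
   ("epsilon_k", "derived"),
   ("c_4", "derived"),
   ("z_0", "derived"),
   ("gamma_function", "derived"),
   ("m_nu", "derived"),
   ("sigma_m_nu", "derived"),
   ("m_s_m_d_ratio", "derived"),
   ("mu_p", "derived"),
   ("mu_p_mu_n", "derived"),
   ("delta_m_n_p", "derived"),
   ("m_p", "derived"),
   ("f_pi_lambda_qcd", "derived")]

def categorize_constant_alt (constant_data : List (String × String)) : String :=
  match constant_data.lookup "id" with
  | none => ""   -- Python raises KeyError here; excluded by Pre_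
  | some cid =>
    match idCategoryPairs.lookup cid with
    | some c => c
    | none => (constant_data.lookup "category").getD "derived"

-- ===== PRECONDITION & SPEC =====
-- Pre_ excludes exactly the inputs without an "id" key, on which Python A raises KeyError.
def Pre_categorize_constant (constant_data : List (String × String)) : Prop :=
  "id" ∈ constant_data.map Prod.fst
instance (constant_data : List (String × String)) : Decidable (Pre_categorize_constant constant_data) := by unfold Pre_categorize_constant; infer_instance

def pvWitness_categorize_constant : (List (String × String)) := [("id", "alpha")]

def Spec_categorize_constant (constant_data : List (String × String)) (out : String) : Prop := out = categorize_constant_alt constant_data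
instance (constant_data : List (String × String)) (out : String) : Decidable (Spec_categorize_constant constant_data out) := by unfold Spec_categorize_constant; infer_instance

-- ===== CLAIM (what is proved, stated in full; the proofs are below) =====
def Claim_equal_categorize_constant : Prop := ∀ (constant_data : List (String × String)), Dom_categorize_constant constant_data → Pre_categorize_constant constant_data → Spec_categorize_constant constant_data (categorize_constant constant_data)

-- ===== LEMMAS AND PROOFS =====

-- first-match lookup in one flattened category block
theorem lookup_map_append (ids : List String) (c cid : String) (rest : List (String × String)) :
    List.lookup cid (ids.map (fun i => (i, c)) ++ rest)
      = if ids.contains cid then some c else List.lookup cid rest := by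
  induction ids with
  | nil => simp
  | cons i tl ih =>
    by_cases h : cid = i
    · simp [List.lookup, h]
    · have hb : (cid == i) = false := by simp [h]
      simp [List.lookup, hb, ih, h]

-- first-match lookup over the flattened table is A's category scan
theorem lookup_flatten (t : List (String × List String)) (cid : String) :
    List.lookup cid (t.flatMap (fun p => p.2.map (fun i => (i, p.1)))) = findCategory cid t := by
  induction t with
  | nil => simp [findCategory]
  | cons p tl ih => simp [findCategory, lookup_map_append, ih]

-- Source B's literal flat dict is exactly the flattening of A's table
theorem idCategoryPairs_eq :
    idCategoryPairs = catTable.flatMap (fun p => p.2.map (fun i => (i, p.1))) := by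
  decide

-- ===== VERDICT (by name: the statement is the Claim_ definition above) =====
theorem categorize_constant_spec : Claim_equal_categorize_constant := by
  intro cd _ _
  unfold Spec_categorize_constant categorize_constant categorize_constant_alt
  cases List.lookup "id" cd <;>
    simp only [idCategoryPairs_eq, lookup_flatten]
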